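-- pv_equiv track=rewrite | github.com/kevinngx/23T1-COMP9021-Principles-of-Programming | Week 03/Quiz 3/quiz_3_kevinngx_v1.py | get_initial_position
-- ===== SOURCE A (Python) =====
-- def get_initial_position(directions):
--     position = 0
--     min_position = 0
--     for direction in directions:
--         if direction == '1':
--             position += -1
--         elif direction == '2':
--             position += 1
--         elif direction == '0':
--             position += 0
--         min_position = min(position, min_position)
--     if min_position < 0:
--         return abs(min_position)
--     else:
--         return 0
-- ===== SOURCE B (Python) =====
-- def get_initial_position(directions):
--     # Backward pass: 'need' is the offset required so that the remaining suffix
--     # never goes below zero. A '1' (step -1) raises the need by one, a '2'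
--     # (step +1) lowers it, and it is clamped at 0 since surplus cannot be stored.
--     need = 0
--     for c in reversed(directions):
--         if c == '1':
--             need += 1
--         elif c == '2':
--             need -= 1
--         if need < 0:
--             need = 0
--     return need
-- ===== Notes on version B (the rewrite author's own statement) =====
-- stated objective: alternative
-- what changed: B replaces A's forward prefix-sum-with-running-minimum by a backward pass over the reversed string tracking the clamped 'offset still needed' for the remaining suffix (the gas-station trick), with no positions and no min at all.
import Mathlib
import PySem

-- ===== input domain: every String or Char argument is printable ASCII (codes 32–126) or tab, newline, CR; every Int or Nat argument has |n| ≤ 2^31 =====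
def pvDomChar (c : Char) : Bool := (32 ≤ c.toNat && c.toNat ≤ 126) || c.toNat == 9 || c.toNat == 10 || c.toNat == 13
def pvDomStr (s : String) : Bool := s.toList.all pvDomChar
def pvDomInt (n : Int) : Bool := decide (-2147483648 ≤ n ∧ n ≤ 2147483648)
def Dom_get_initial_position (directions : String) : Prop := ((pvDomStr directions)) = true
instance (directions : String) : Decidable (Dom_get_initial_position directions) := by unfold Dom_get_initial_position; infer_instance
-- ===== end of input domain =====

-- B replaces A's forward prefix-sum/running-minimum loop by a backward pass over the
-- reversed string tracking the clamped "offset still needed" (objective: alternative).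

-- ===== PORT A =====
def get_initial_position (directions : String) : Int :=
  let st := directions.toList.foldl
    (fun (pm : Int × Int) direction =>
      let position :=
        if direction = '1' then pm.1 + (-1)
        else if direction = '2' then pm.1 + 1
        else if direction = '0' then pm.1 + 0
        else pm.1
      (position, min position pm.2)) (0, 0)
  if st.2 < 0 then |st.2| else 0

-- ===== PORT B =====
def get_initial_position_alt (directions : String) : Int :=
  directions.toList.reverse.foldl
    (fun (need : Int) c =>
      let n := if c = '1' then need + 1 else if c = '2' then need - 1 else need
      if n < 0 then 0 else n) 0

-- ===== PRECONDITION & SPEC =====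
def Spec_get_initial_position (directions : String) (out : Int) : Prop := out = get_initial_position_alt directions
instance (directions : String) (out : Int) : Decidable (Spec_get_initial_position directions out) := by unfold Spec_get_initial_position; infer_instance

-- ===== CLAIM (what is proved, stated in full; the proofs are below) =====
def Claim_equal_get_initial_position : Prop := ∀ (directions : String), Dom_get_initial_position directions → Spec_get_initial_position directions (get_initial_position directions)

-- ===== LEMMAS AND PROOFS =====

def pvStep (c : Char) : Int := if c = '1' then -1 else if c = '2' then 1 else 0

-- minimum prefix sum (over all prefixes, including the empty one) of the suffix's steps
def pvN : List Char → Int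
  | [] => 0
  | c :: t => min 0 (pvStep c + pvN t)

theorem pvN_nonpos (l : List Char) : pvN l ≤ 0 := by
  cases l with
  | nil => exact le_refl _
  | cons c t => exact min_le_left _ _

-- A's fold, with running minimum seeded by (p, m), m ≤ p: the final minimum is min m (p + pvN l)
theorem foldA_snd (l : List Char) : ∀ (p m : Int), m ≤ p →
    (l.foldl (fun (pm : Int × Int) direction =>
      let position :=
        if direction = '1' then pm.1 + (-1)
        else if direction = '2' then pm.1 + 1
        else if direction = '0' then pm.1 + 0
        else pm.1
      (position, min position pm.2)) (p, m)).2 = min m (p + pvN l) := by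
  induction l with
  | nil => intro p m h; simp [pvN]; omega
  | cons c t ih =>
    intro p m h
    have hstep : (if c = '1' then p + (-1) else if c = '2' then p + 1 else if c = '0' then p + 0 else p)
        = p + pvStep c := by
      unfold pvStep; split_ifs <;> ring
    simp only [List.foldl_cons, pvN, hstep]
    rw [ih (p + pvStep c) (min (p + pvStep c) m) (min_le_left _ _)]
    have h2 := pvN_nonpos t
    omega

-- B's backward fold computes -pvN
theorem foldB_eq (l : List Char) :
    (l.reverse.foldl
      (fun (need : Int) c =>
        let n := if c = '1' then need + 1 else if c = '2' then need - 1 else need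
        if n < 0 then 0 else n) 0) = -pvN l := by
  rw [List.foldl_reverse]
  induction l with
  | nil => simp [pvN]
  | cons c t ih =>
    simp only [List.foldr_cons, pvN, ih]
    have h := pvN_nonpos t
    unfold pvStep
    split_ifs <;> omega

-- ===== VERDICT (by name: the statement is the Claim_ definition above) =====
theorem get_initial_position_spec : Claim_equal_get_initial_position := by
  unfold Claim_equal_get_initial_position
  intro directions _
  unfold Spec_get_initial_position get_initial_position get_initial_position_alt
  simp only [foldA_snd directions.toList 0 0 (le_refl 0), foldB_eq directions.toList]
  have h := pvN_nonpos directions.toList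
  split_ifs with hlt
  · rw [abs_of_neg (by omega)]; omega
  · omega
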